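-- pv_equiv track=rewrite | github.com/tommasoromano/unimi-language-detection | generate.py | make_prompts
-- ===== SOURCE A (Python) =====
-- def make_prompts(c, i, e, q, t, formats:list[str]):
--   """Generate prompts from the given components. Returns [id, prompt] pairs."""
--   x = {
--     'c': c,
--     'i': i,
--     'e': e,
--     'q': q,
--     't': t,
--   }
--   def add_prompts(letter, prompts):
--     return [
--       (f"{p_id}_{letter}{x_i}", p_p + ' ' + x_p)
--       for p_id, p_p in prompts
--       for x_i, x_p in enumerate(x[letter])
--     ]
--   final_prompts = []
--   for format in formats:
--     prompts = [(f"{format[0]}{i}", p) for i,p in enumerate(x[format[0]])]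
--     for letter in format[1:]:
--       prompts = add_prompts(letter, prompts)
--     final_prompts += prompts
--   return final_prompts
-- ===== SOURCE B (Python) =====
-- from itertools import product
--
-- def make_prompts(c, i, e, q, t, formats:list[str]):
--   """Generate prompts from the given components. Returns [id, prompt] pairs."""
--   x = {'c': c, 'i': i, 'e': e, 'q': q, 't': t}
--   out = []
--   for fmt in formats:
--     pools = [list(enumerate(x[l])) for l in fmt]
--     for combo in product(*pools):
--       pid = f"{fmt[0]}{combo[0][0]}" + ''.join(
--         f"_{l}{k}" for l, (k, _) in zip(fmt[1:], combo[1:]))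
--       out.append((pid, ' '.join(v for _, v in combo)))
--   return out
-- ===== Notes on version B (the rewrite author's own statement) =====
-- stated objective: idiomatic
-- what changed: B replaces A's per-letter fold that repeatedly rebuilds the whole intermediate prompt list (re-concatenating ids and prompts at every step) with a single itertools.product pass per format that builds each id and prompt once from the full index combination.
import Mathlib
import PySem

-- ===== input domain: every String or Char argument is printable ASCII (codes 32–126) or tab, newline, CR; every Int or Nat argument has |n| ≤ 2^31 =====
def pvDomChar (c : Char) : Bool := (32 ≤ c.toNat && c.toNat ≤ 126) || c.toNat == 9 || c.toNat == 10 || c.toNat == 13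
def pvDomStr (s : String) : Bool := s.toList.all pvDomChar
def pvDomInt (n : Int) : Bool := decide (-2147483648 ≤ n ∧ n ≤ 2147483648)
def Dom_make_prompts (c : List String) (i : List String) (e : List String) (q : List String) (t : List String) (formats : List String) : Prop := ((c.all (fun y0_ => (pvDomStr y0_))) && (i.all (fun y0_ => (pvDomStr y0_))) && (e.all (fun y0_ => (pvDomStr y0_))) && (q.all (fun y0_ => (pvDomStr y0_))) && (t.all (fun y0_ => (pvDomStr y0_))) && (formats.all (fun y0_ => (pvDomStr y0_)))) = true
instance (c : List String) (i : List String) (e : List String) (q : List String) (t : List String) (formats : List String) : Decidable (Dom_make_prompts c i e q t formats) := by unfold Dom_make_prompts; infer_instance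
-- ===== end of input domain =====

-- B builds each (id, prompt) pair in one itertools.product pass per format instead of A's
-- per-letter fold that rebuilds the whole intermediate list; same return value on Pre_.


-- ===== PORT A =====
-- the dict x = {'c': c, 'i': i, 'e': e, 'q': q, 't': t}; lookup by letter
-- (letters outside the dict raise KeyError in Python and are excluded by Pre_)
def pvX (c : List String) (i : List String) (e : List String) (q : List String) (t : List String) (l : Char) : List String :=
  if l = 'c' then c else if l = 'i' then i else if l = 'e' then e
  else if l = 'q' then q else if l = 't' then t else []

-- add_prompts(letter, prompts): nested comprehension, prompts outer, enumerate inner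
def pvAddPrompts (xs : List String) (letter : Char) (prompts : List (String × String)) : List (String × String) :=
  prompts.flatMap (fun p =>
    (PySem.List.enumerate xs).map (fun kv =>
      (p.1 ++ "_" ++ String.mk [letter] ++ PySem.Int.toStr kv.1, p.2 ++ " " ++ kv.2)))

def make_prompts (c : List String) (i : List String) (e : List String) (q : List String) (t : List String) (formats : List String) : List (String × String) :=
  formats.foldl (fun acc format =>
    match format.toList with
    | [] => acc   -- format[0] raises IndexError in Python; excluded by Pre_
    | h :: rest =>
      let prompts0 := (PySem.List.enumerate (pvX c i e q t h)).map
        (fun kv => (String.mk [h] ++ PySem.Int.toStr kv.1, kv.2))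
      acc ++ rest.foldl (fun ps l => pvAddPrompts (pvX c i e q t l) l ps) prompts0) []

-- ===== PORT B =====
-- itertools.product over the pools (last pool varies fastest)
def pvProduct {α : Type} : List (List α) → List (List α)
  | [] => [[]]
  | p :: ps => p.flatMap (fun a => (pvProduct ps).map (fun combo => a :: combo))

def make_prompts_alt (c : List String) (i : List String) (e : List String) (q : List String) (t : List String) (formats : List String) : List (String × String) :=
  formats.foldl (fun out fmt =>
    match fmt.toList with
    | [] => out   -- combo[0] raises IndexError in Python; excluded by Pre_
    | h :: rest =>
      let pools := (h :: rest).map (fun l => PySem.List.enumerate (pvX c i e q t l))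
      out ++ (pvProduct pools).map (fun combo =>
        match combo with
        | [] => ("", "")   -- unreachable: every combo has the (nonempty) length of pools
        | kv0 :: restc =>
          (String.mk [h] ++ PySem.Int.toStr kv0.1 ++
             PySem.Str.join "" ((rest.zip restc).map
               (fun lp => "_" ++ String.mk [lp.1] ++ PySem.Int.toStr lp.2.1)),
           PySem.Str.join " " ((kv0 :: restc).map (fun kv => kv.2))))) []

-- ===== PRECONDITION & SPEC =====
-- Pre_ excludes exactly the inputs on which Python A raises: an empty format string
-- (IndexError on format[0]) or a format letter outside the dict keys c,i,e,q,t (KeyError).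
def Pre_make_prompts (c : List String) (i : List String) (e : List String) (q : List String) (t : List String) (formats : List String) : Prop :=
  ∀ f ∈ formats, f.toList ≠ [] ∧
    (f.toList.all (fun l => l == 'c' || l == 'i' || l == 'e' || l == 'q' || l == 't')) = true
instance (c : List String) (i : List String) (e : List String) (q : List String) (t : List String) (formats : List String) : Decidable (Pre_make_prompts c i e q t formats) := by unfold Pre_make_prompts; infer_instance

def pvWitness_make_prompts : List String × List String × List String × List String × List String × List String :=
  (["a"], ["b"], [], ["d"], [], ["cq", "t"])

def Spec_make_prompts (c : List String) (i : List String) (e : List String) (q : List String) (t : List String) (formats : List String) (out : List (String × String)) : Prop := out = make_prompts_alt c i e q t formats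
instance (c : List String) (i : List String) (e : List String) (q : List String) (t : List String) (formats : List String) (out : List (String × String)) : Decidable (Spec_make_prompts c i e q t formats out) := by unfold Spec_make_prompts; infer_instance

-- ===== CLAIM (what is proved, stated in full; the proofs are below) =====
def Claim_equal_make_prompts : Prop := ∀ (c : List String) (i : List String) (e : List String) (q : List String) (t : List String) (formats : List String), Dom_make_prompts c i e q t formats → Pre_make_prompts c i e q t formats → Spec_make_prompts c i e q t formats (make_prompts c i e q t formats)

-- ===== LEMMAS AND PROOFS =====

-- ''.join / ' '.join bridges, proved on the List Char side
lemma charsJoinEmpty_cons (s : List Char) (l : List (List Char)) :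
    PySem.Chars.join [] (s :: l) = s ++ PySem.Chars.join [] l := by
  cases l with
  | nil => simp [PySem.Chars.join_singleton, PySem.Chars.join_nil]
  | cons b l => rw [PySem.Chars.join_cons_cons]; simp

lemma charsJoinSep (v : List Char) (vs : List (List Char)) :
    PySem.Chars.join [' '] (v :: vs) = v ++ PySem.Chars.join [] (vs.map (fun s => ' ' :: s)) := by
  induction vs generalizing v with
  | nil => simp [PySem.Chars.join_singleton, PySem.Chars.join_nil]
  | cons b l ih =>
    rw [PySem.Chars.join_cons_cons, ih b, List.map_cons, charsJoinEmpty_cons]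
    simp [List.append_assoc]

lemma joinEmpty_cons (s : String) (l : List String) :
    PySem.Str.join "" (s :: l) = s ++ PySem.Str.join "" l := by
  apply String.toList_inj.mp
  simp [PySem.Str.toList_join, charsJoinEmpty_cons]

lemma joinSep_cons (v : String) (vs : List String) :
    PySem.Str.join " " (v :: vs) = v ++ PySem.Str.join "" (vs.map (fun s => " " ++ s)) := by
  apply String.toList_inj.mp
  have hsp : (" " : String).toList = [' '] := rfl
  simp [PySem.Str.toList_join, hsp, charsJoinSep, List.map_map, Function.comp_def,
    String.toList_append]

-- core bridge: A's left fold of add_prompts over the remaining letters equals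
-- the product-driven construction, for ANY starting prompt list
lemma fold_add_eq_product (X : Char → List String) (ls : List Char) (ps : List (String × String)) :
    ls.foldl (fun a l => pvAddPrompts (X l) l a) ps =
    ps.flatMap (fun p =>
      (pvProduct (ls.map (fun l => PySem.List.enumerate (X l)))).map
        (fun combo =>
          (p.1 ++ PySem.Str.join "" ((ls.zip combo).map
              (fun lp => "_" ++ String.mk [lp.1] ++ PySem.Int.toStr lp.2.1)),
           p.2 ++ PySem.Str.join "" (combo.map (fun kv => " " ++ kv.2))))) := by
  induction ls generalizing ps with
  | nil =>
    have h0 : PySem.Str.join "" ([] : List String) = "" := rfl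
    simp [pvProduct, h0]
  | cons l ls ih =>
    rw [List.foldl_cons, ih]
    simp only [pvAddPrompts, pvProduct, List.map_cons]
    rw [List.flatMap_assoc]
    apply List.flatMap_congr
    intro p _
    rw [List.flatMap_map, List.map_flatMap]
    apply List.flatMap_congr
    intro kv _
    rw [List.map_map]
    apply List.map_congr_left
    intro combo _
    simp only [Function.comp, List.zip_cons_cons, List.map_cons, joinEmpty_cons,
      String.append_assoc]

theorem make_prompts_eq (c i e q t : List String) (formats : List String)
    (hpre : Pre_make_prompts c i e q t formats) :
    make_prompts c i e q t formats = make_prompts_alt c i e q t formats := by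
  unfold make_prompts make_prompts_alt
  induction formats using List.reverseRecOn with
  | nil => rfl
  | append_singleton fs f ih =>
    have hpre' : Pre_make_prompts c i e q t fs := fun g hg => hpre g (by simp [hg])
    have hf := hpre f (by simp)
    obtain ⟨h, rest, hfmt⟩ := List.exists_cons_of_ne_nil hf.1
    simp only [List.foldl_append, List.foldl_cons, List.foldl_nil, ih hpre', hfmt]
    congr 1
    rw [fold_add_eq_product, List.flatMap_map]
    simp only [pvProduct, List.map_cons, List.map_flatMap]
    apply List.flatMap_congr
    intro kv0 _
    rw [List.map_map]
    apply List.map_congr_left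
    intro combo _
    simp only [Function.comp_def, joinSep_cons, List.map_map, String.append_assoc]

-- ===== VERDICT (by name: the statement is the Claim_ definition above) =====
theorem make_prompts_spec : Claim_equal_make_prompts := by
  intro c i e q t formats _ hpre
  unfold Spec_make_prompts
  exact make_prompts_eq c i e q t formats hpre
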